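-- pv_equiv track=rewrite | github.com/robochat/buildbit | buildbit/fpmatch.py | count_patterns
-- ===== SOURCE A (Python) =====
-- def count_patterns(s):
--     """count number of pattern (%) wildcards in glob.
--     """
--     i, n = 0, len(s)
--     res = 0
--     while i < n:
--         c = s[i]
--         i = i+1
--         if c == '%':
--             res += 1
--         elif c == '[':
--             j = i
--             while j < n and s[j] != ']':
--                 j = j+1
--             if j >= n:
--                 pass #bracket never closed so treating [ as a literal
--             else:
--                 i = j+1
--     return res
-- ===== SOURCE B (Python) =====
-- import re
--
-- def count_patterns(s):
--     """count number of pattern (%) wildcards in glob."""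
--     # strip every closed bracket group [...] (up to its first ']'), then count
--     return re.sub(r'\[[^\]]*\]', '', s).count('%')
-- ===== Notes on version B (the rewrite author's own statement) =====
-- stated objective: simpler
-- what changed: Replaces the hand-written index-jumping while-loop with a two-phase pipeline: a regex substitution strips every closed bracket group (up to its first closing bracket), then a single str.count pass counts the wildcards.
import Mathlib
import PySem

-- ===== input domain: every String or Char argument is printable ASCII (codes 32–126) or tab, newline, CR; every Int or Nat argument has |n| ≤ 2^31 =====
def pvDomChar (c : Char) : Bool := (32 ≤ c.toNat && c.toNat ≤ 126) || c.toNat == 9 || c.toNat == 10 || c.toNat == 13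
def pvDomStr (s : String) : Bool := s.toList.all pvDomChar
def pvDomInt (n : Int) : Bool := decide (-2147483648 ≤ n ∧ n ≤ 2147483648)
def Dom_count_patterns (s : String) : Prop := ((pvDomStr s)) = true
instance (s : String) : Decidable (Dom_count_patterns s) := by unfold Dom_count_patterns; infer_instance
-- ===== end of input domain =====

-- B strips every closed bracket group first (one regex-like pass) and then counts '%' in
-- the cleaned string; A index-jumps through the original string with a counter. Return
-- values agree on all strings; B is the simpler two-phase pipeline.

-- ===== PORT A =====
-- inner while loop: `j = i; while j < n and s[j] != ']': j += 1`
def pvScanJ (cs : List Char) (n j : Nat) : Nat :=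
  if j < n then
    if cs.getD j ' ' = ']' then j else pvScanJ cs n (j+1)
  else j
termination_by n - j

theorem pvScanJ_ge (cs : List Char) (n j : Nat) : j ≤ pvScanJ cs n j := by
  fun_induction pvScanJ cs n j with
  | case1 => exact Nat.le_refl _
  | case2 _ _ _ ih => omega
  | case3 => exact Nat.le_refl _

-- outer while loop of A, over the index i
def pvLoopA (cs : List Char) (n i : Nat) (res : Int) : Int :=
  if i < n then
    let c := cs.getD i ' '
    if c = '%' then pvLoopA cs n (i+1) (res+1)
    else if c = '[' then
      let j := pvScanJ cs n (i+1)
      if j ≥ n then pvLoopA cs n (i+1) res   -- bracket never closed: '[' is a literal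
      else pvLoopA cs n (j+1) res
    else pvLoopA cs n (i+1) res
  else res
termination_by n - i
decreasing_by
  · omega
  · omega
  · have := pvScanJ_ge cs n (i+1); omega
  · omega

def count_patterns (s : String) : Int :=
  pvLoopA s.toList s.toList.length 0 0

-- ===== PORT B =====
-- hand port of the regex r'\[[^\]]*\]': after a '[', the group closes at the first ']'.
-- pvFindClose t = the suffix after the first ']' of t (none if t has no ']')
def pvFindClose : List Char → Option (List Char)
  | [] => none
  | c :: t => if c = ']' then some t else pvFindClose t

theorem pvFindClose_some_length : ∀ (t r : List Char), pvFindClose t = some r → r.length < t.length := by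
  intro t
  induction t with
  | nil => intro r h; simp [pvFindClose] at h
  | cons c t ih =>
    intro r h
    by_cases hc : c = ']'
    · simp [pvFindClose, hc] at h; simp [← h]
    · simp [pvFindClose, hc] at h
      have := ih r h
      simp; omega

-- re.sub(r'\[[^\]]*\]', '', s): drop every closed bracket group, keep everything else
def pvStrip : List Char → List Char
  | [] => []
  | c :: t =>
    if c = '[' then
      match h : pvFindClose t with
      | some r => pvStrip r
      | none => c :: pvStrip t
    else c :: pvStrip t
termination_by cs => cs.length
decreasing_by
  · have := pvFindClose_some_length t r h; simp; omega
  · simp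
  · simp

def count_patterns_alt (s : String) : Int :=
  ((pvStrip s.toList).count '%' : Int)

-- ===== PRECONDITION & SPEC =====
def Spec_count_patterns (s : String) (out : Int) : Prop := out = count_patterns_alt s
instance (s : String) (out : Int) : Decidable (Spec_count_patterns s out) := by unfold Spec_count_patterns; infer_instance

-- ===== CLAIM (what is proved, stated in full; the proofs are below) =====
def Claim_equal_count_patterns : Prop := ∀ (s : String), Dom_count_patterns s → Spec_count_patterns s (count_patterns s)

-- ===== LEMMAS AND PROOFS =====

theorem pvStrip_bracket_some (t r : List Char) (h : pvFindClose t = some r) :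
    pvStrip ('[' :: t) = pvStrip r := by
  rw [pvStrip]
  split
  · split <;> simp_all
  · simp_all

theorem pvStrip_bracket_none (t : List Char) (h : pvFindClose t = none) :
    pvStrip ('[' :: t) = '[' :: pvStrip t := by
  rw [pvStrip]
  split
  · split <;> simp_all
  · simp_all

theorem pvStrip_cons_ne (c : Char) (t : List Char) (h : ¬ c = '[') :
    pvStrip (c :: t) = c :: pvStrip t := by
  rw [pvStrip]
  simp [h]

theorem pvScanJ_spec (cs : List Char) (j : Nat) (hj : j ≤ cs.length) :
    pvScanJ cs cs.length j ≤ cs.length ∧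
    (pvScanJ cs cs.length j < cs.length →
      pvFindClose (cs.drop j) = some (cs.drop (pvScanJ cs cs.length j + 1))) ∧
    (¬ pvScanJ cs cs.length j < cs.length → pvFindClose (cs.drop j) = none) := by
  fun_induction pvScanJ cs cs.length j with
  | case1 j hlt hc =>
    refine ⟨Nat.le_of_lt hlt, fun _ => ?_, fun h => absurd hlt h⟩
    have hdrop : cs.drop j = cs[j] :: cs.drop (j+1) := List.drop_eq_getElem_cons hlt
    have hci : cs[j] = ']' := by rw [← List.getD_eq_getElem cs ' ' hlt]; exact hc
    rw [hdrop, hci]; simp [pvFindClose]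
  | case2 j hlt hc ih =>
    obtain ⟨h1, h2, h3⟩ := ih hlt
    have hdrop : cs.drop j = cs[j] :: cs.drop (j+1) := List.drop_eq_getElem_cons hlt
    have hne : cs[j] ≠ ']' := by rw [← List.getD_eq_getElem cs ' ' hlt]; exact hc
    rw [hdrop]
    refine ⟨h1, fun h => ?_, fun h => ?_⟩
    · simpa [pvFindClose, hne] using h2 h
    · simpa [pvFindClose, hne] using h3 h
  | case3 j hlt =>
    have hjn : j = cs.length := by omega
    refine ⟨hj, fun h => absurd h hlt, fun _ => ?_⟩
    rw [hjn]; simp [pvFindClose]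

theorem pvLoopA_strip (cs : List Char) (i : Nat) (res : Int) :
    pvLoopA cs cs.length i res = res + ((pvStrip (cs.drop i)).count '%' : Int) := by
  fun_induction pvLoopA cs cs.length i res with
  | case1 i res hlt c hc ih =>
    have hdrop : cs.drop i = cs[i] :: cs.drop (i+1) := List.drop_eq_getElem_cons hlt
    have hci : cs[i] = '%' := by rw [← List.getD_eq_getElem cs ' ' hlt]; exact hc
    rw [ih, hdrop, hci, pvStrip_cons_ne _ _ (by decide)]
    simp
    ring
  | case2 i res hlt c hc hb j hge ih =>
    -- unclosed bracket: '[' treated as literal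
    have hdrop : cs.drop i = cs[i] :: cs.drop (i+1) := List.drop_eq_getElem_cons hlt
    have hci : cs[i] = '[' := by rw [← List.getD_eq_getElem cs ' ' hlt]; exact hb
    have hnone : pvFindClose (cs.drop (i+1)) = none :=
      (pvScanJ_spec cs (i+1) hlt).2.2 (by omega)
    rw [ih, hdrop, hci, pvStrip_bracket_none _ hnone]
    simp
  | case3 i res hlt c hc hb j hge ih =>
    -- closed bracket group: skip to just after the ']'
    have hdrop : cs.drop i = cs[i] :: cs.drop (i+1) := List.drop_eq_getElem_cons hlt
    have hci : cs[i] = '[' := by rw [← List.getD_eq_getElem cs ' ' hlt]; exact hb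
    have hsome : pvFindClose (cs.drop (i+1)) = some (cs.drop (j+1)) :=
      (pvScanJ_spec cs (i+1) hlt).2.1 (by omega)
    rw [ih, hdrop, hci, pvStrip_bracket_some _ _ hsome]
  | case4 i res hlt c hc hb ih =>
    -- ordinary character
    have hdrop : cs.drop i = cs[i] :: cs.drop (i+1) := List.drop_eq_getElem_cons hlt
    have hc' : cs[i] ≠ '%' := by rw [← List.getD_eq_getElem cs ' ' hlt]; exact hc
    have hb' : cs[i] ≠ '[' := by rw [← List.getD_eq_getElem cs ' ' hlt]; exact hb
    rw [ih, hdrop, pvStrip_cons_ne _ _ hb']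
    simp [hc']
  | case5 i res hlt =>
    have hnil : cs.drop i = [] := List.drop_eq_nil_of_le (by omega)
    simp [hnil, pvStrip]

-- ===== VERDICT (by name: the statement is the Claim_ definition above) =====
theorem count_patterns_spec : Claim_equal_count_patterns := by
  intro s _
  unfold Spec_count_patterns count_patterns count_patterns_alt
  simpa using pvLoopA_strip s.toList 0 0
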